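-- pv_equiv track=rewrite | github.com/Mocha2007/mochalib | mocharunsstraights.py | sor
-- ===== SOURCE A (Python) =====
-- from collections import Counter
--
-- def straights(lis: list) -> list:
-- 	tot = []
-- 	count = Counter(lis)
-- 	for i in set(lis):
-- 		tot.append([i]*count[i])
-- 	tot.sort()
-- 	return tot
--
-- def runs(lis: list) -> list:
-- 	tot = []
-- 	for i in lis:
-- 		run = [i]
-- 		size = 1
-- 		while i+size in lis:
-- 			run.append(i+size)
-- 			size += 1
-- 		tot.append(run)
-- 	tot.sort()
-- 	return [tot[i] for i in range(len(tot)) if i == 0 or tot[i] != tot[i-1]]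
--
-- def sor(lis: list) -> int:
-- 	m = []
-- 	for i in runs(lis):
-- 		if len(m) < len(i):
-- 			m = i
-- 	for i in straights(lis):
-- 		if len(m) < len(i):
-- 			m = i
-- 	return m
-- ===== SOURCE B (Python) =====
-- from collections import Counter
--
-- def sor(lis: list) -> int:
-- 	if not lis:
-- 		return []
-- 	cnt = Counter(lis)
-- 	c = max(cnt.values())
-- 	v = min(k for k, n in cnt.items() if n == c)
-- 	vals = sorted(cnt)
-- 	best_start, best_len = vals[0], 1
-- 	cur_start, cur_len = vals[0], 1
-- 	for x in vals[1:]: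
-- 		if x == cur_start + cur_len:
-- 			cur_len += 1
-- 		else:
-- 			cur_start, cur_len = x, 1
-- 		if cur_len > best_len:
-- 			best_start, best_len = cur_start, cur_len
-- 	if best_len < c:
-- 		return [v] * c
-- 	return [best_start + i for i in range(best_len)]
-- ===== Notes on version B (the rewrite author's own statement) =====
-- stated objective: faster
-- what changed: Replaces A's quadratic-or-worse scheme (growing a run from every element via repeated 'in lis' scans, sorting the list of runs and the list of duplicate groups, then scanning both) with one Counter pass plus a single linear sweep over the sorted distinct values that finds the longest consecutive block (smallest start on ties), comparing it with the largest duplicate group (smallest value on ties).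
import Mathlib
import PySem

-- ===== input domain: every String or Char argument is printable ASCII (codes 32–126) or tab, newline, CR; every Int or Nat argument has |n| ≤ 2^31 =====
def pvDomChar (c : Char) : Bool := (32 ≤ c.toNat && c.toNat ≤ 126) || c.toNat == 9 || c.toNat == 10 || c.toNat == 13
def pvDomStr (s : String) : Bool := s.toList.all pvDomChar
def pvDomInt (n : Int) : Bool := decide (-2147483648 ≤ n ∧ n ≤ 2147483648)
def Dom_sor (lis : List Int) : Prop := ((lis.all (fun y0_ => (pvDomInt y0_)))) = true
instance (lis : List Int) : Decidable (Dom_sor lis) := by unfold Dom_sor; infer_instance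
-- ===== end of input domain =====

-- B replaces A's quadratic run-growing/sorting scheme by one Counter pass plus a single
-- linear sweep over the sorted distinct values (objective: faster).
-- ===== PORT A =====
-- while i+size in lis: run.append(i+size); size += 1   (fuel = lis.length+1: the loop can
-- succeed at most lis.length times, since i+1..i+size are distinct members of lis)
def sorWhile (lis : List Int) : Nat → Int → List Int → Int → List Int
  | 0, _, run, _ => run
  | f + 1, i, run, size =>
    if (i + size) ∈ lis then sorWhile lis f i (run ++ [i + size]) (size + 1)
    else run

-- straights(lis): tot = [[i]*count[i] for i in set(lis)]; tot.sort()
-- (iterating the set is safe here: sorting makes the result independent of set order)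
def sorStraights (lis : List Int) : List (List Int) :=
  let count := PySem.Dict.counter lis
  let tot := (PySem.Set.ofList lis).foldl
    (fun tot i => tot ++ [List.replicate (count.getD i 0).toNat i]) []
  PySem.List.sorted tot (fun x => x) false

-- runs(lis): for each i in lis grow a run while i+size in lis; sort; drop adjacent duplicates
def sorRuns (lis : List Int) : List (List Int) :=
  let tot := lis.foldl (fun tot i => tot ++ [sorWhile lis (lis.length + 1) i [i] 1]) []
  let tot := PySem.List.sorted tot (fun x => x) false
  (PySem.List.pyRange 0 tot.length 1).foldl
    (fun acc j =>
      if j = 0 ∨ PySem.List.pyGetD tot j [] ≠ PySem.List.pyGetD tot (j - 1) [] then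
        acc ++ [PySem.List.pyGetD tot j []]
      else acc) []

def sor (lis : List Int) : List Int :=
  let m := (sorRuns lis).foldl (fun m i => if m.length < i.length then i else m) []
  (sorStraights lis).foldl (fun m i => if m.length < i.length then i else m) m

-- ===== PORT B =====
def sor_alt (lis : List Int) : List Int :=
  if lis = [] then []
  else
    let cnt := PySem.Dict.counter lis
    let c := (PySem.List.max? cnt.values (fun y => y)).getD 0        -- max(cnt.values()); cnt nonempty
    let v := (PySem.List.min? ((cnt.items.filter (fun p => p.2 == c)).map (fun p => p.1))
      (fun y => y)).getD 0                                           -- min(k for k, n in cnt.items() if n == c)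
    let vals := PySem.List.sorted cnt.keys (fun x => x) false        -- sorted(cnt)
    match vals with
    | [] => []                                                       -- unreachable: lis nonempty
    | v0 :: rest =>
      let st := rest.foldl
        (fun (s : Int × Int × Int × Int) x =>
          let (bs, bl, cs, cl) := s
          let cs' := if x = cs + cl then cs else x
          let cl' := if x = cs + cl then cl + 1 else 1
          if bl < cl' then (cs', cl', cs', cl') else (bs, bl, cs', cl'))
        (v0, 1, v0, 1)
      let (bs, bl, _, _) := st
      if bl < c then List.replicate c.toNat v
      else (PySem.List.pyRange 0 bl 1).map (fun i => bs + i)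

-- ===== PRECONDITION & SPEC =====
def Spec_sor (lis : List Int) (out : List Int) : Prop := out = sor_alt lis
instance (lis : List Int) (out : List Int) : Decidable (Spec_sor lis out) := by unfold Spec_sor; infer_instance

-- ===== CLAIM (what is proved, stated in full; the proofs are below) =====
def Claim_equal_sor : Prop := ∀ (lis : List Int), Dom_sor lis → Spec_sor lis (sor lis)


-- ===== LEMMAS AND PROOFS =====

-- ---- generic list helpers ----
theorem foldl_append_map {A B : Type} (f : A → B) (S : List A) :
    ∀ (acc : List B), S.foldl (fun tot i => tot ++ [f i]) acc = acc ++ S.map f := by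
  induction S with
  | nil => simp
  | cons x xs ih => intro acc; simp [List.foldl, ih]

-- the fold step of both of A's final loops
def pstep (m i : List Int) : List Int := if m.length < i.length then i else m

-- what the "keep the strictly longer" fold computes on a ≤-sorted list
def isQ (t : List (List Int)) (m0 r : List Int) : Prop :=
  (r = m0 ∧ ∀ x ∈ t, x.length ≤ m0.length) ∨
  (r ∈ t ∧ m0.length < r.length ∧ (∀ x ∈ t, x.length ≤ r.length) ∧
    (∀ x ∈ t, x.length = r.length → r ≤ x))

theorem pick_isQ : ∀ (t : List (List Int)) (m0 : List Int), t.Pairwise (· ≤ ·) →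
    isQ t m0 (t.foldl pstep m0) := by
  intro t
  induction t with
  | nil => intro m0 _; left; exact ⟨rfl, by simp⟩
  | cons x xs ih =>
    intro m0 hp
    rw [List.pairwise_cons] at hp
    obtain ⟨hx, hxs⟩ := hp
    simp only [List.foldl_cons]
    by_cases hlt : m0.length < x.length
    · have hstep : pstep m0 x = x := by simp [pstep, hlt]
      rw [hstep]
      rcases ih x hxs with ⟨hr, hall⟩ | ⟨hr, hlen, hall, htie⟩
      · right
        rw [hr]
        refine ⟨List.mem_cons_self, hlt, ?_, ?_⟩
        · intro y hy; rcases List.mem_cons.mp hy with rfl | hy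
          · exact le_refl _
          · exact hall y hy
        · intro y hy _; rcases List.mem_cons.mp hy with rfl | hy
          · exact le_refl _
          · exact hx y hy
      · right
        refine ⟨List.mem_cons_of_mem _ hr, lt_trans hlt hlen, ?_, ?_⟩
        · intro y hy; rcases List.mem_cons.mp hy with rfl | hy
          · exact le_of_lt hlen
          · exact hall y hy
        · intro y hy he; rcases List.mem_cons.mp hy with rfl | hy
          · exfalso; omega
          · exact htie y hy he
    · have hstep : pstep m0 x = m0 := by simp [pstep, hlt]
      rw [hstep]
      rcases ih m0 hxs with ⟨hr, hall⟩ | ⟨hr, hlen, hall, htie⟩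
      · left
        refine ⟨hr, ?_⟩
        intro y hy; rcases List.mem_cons.mp hy with rfl | hy
        · omega
        · exact hall y hy
      · right
        refine ⟨List.mem_cons_of_mem _ hr, hlen, ?_, ?_⟩
        · intro y hy; rcases List.mem_cons.mp hy with rfl | hy
          · omega
          · exact hall y hy
        · intro y hy he; rcases List.mem_cons.mp hy with rfl | hy
          · exfalso; omega
          · exact htie y hy he

theorem isQ_unique (t1 t2 : List (List Int)) (m0 r1 r2 : List Int)
    (h1 : isQ t1 m0 r1) (h2 : isQ t2 m0 r2) (hm : ∀ x, x ∈ t1 ↔ x ∈ t2) : r1 = r2 := by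
  rcases h1 with ⟨e1, a1⟩ | ⟨m1, l1, a1, t1'⟩ <;> rcases h2 with ⟨e2, a2⟩ | ⟨m2, l2, a2, t2'⟩
  · rw [e1, e2]
  · exfalso; have := a1 r2 ((hm r2).mpr m2); omega
  · exfalso; have := a2 r1 ((hm r1).mp m1); omega
  · have hl : r1.length = r2.length :=
      le_antisymm (a2 r1 ((hm r1).mp m1)) (a1 r2 ((hm r2).mpr m2))
    exact le_antisymm (t1' r2 ((hm r2).mpr m2) hl.symm) (t2' r1 ((hm r1).mp m1) hl)

-- ---- the adjacent-dedup comprehension of runs ----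
def ddGo : List Int → List (List Int) → List (List Int)
  | _, [] => []
  | prev, y :: ys => if y ≠ prev then y :: ddGo y ys else ddGo y ys

def dd : List (List Int) → List (List Int)
  | [] => []
  | x :: xs => x :: ddGo x xs

theorem ddGo_sublist (prev : List Int) (ys : List (List Int)) : (ddGo prev ys).Sublist ys := by
  induction ys generalizing prev with
  | nil => simp [ddGo]
  | cons y ys ih =>
    simp only [ddGo]
    split
    · exact List.Sublist.cons₂ y (ih y)
    · exact List.Sublist.cons y (ih y)

theorem mem_ddGo_of_mem (prev y : List Int) (ys : List (List Int)) (h : y ∈ ys) :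
    y = prev ∨ y ∈ ddGo prev ys := by
  induction ys generalizing prev with
  | nil => cases h
  | cons z zs ih =>
    simp only [ddGo]
    rcases List.mem_cons.mp h with rfl | hy
    · by_cases hz : y = prev
      · exact Or.inl hz
      · right; simp [hz]
    · rcases ih z hy with rfl | hmem
      · by_cases hz : y = prev
        · exact Or.inl hz
        · right; simp [hz]
      · right
        split
        · exact List.mem_cons_of_mem _ hmem
        · exact hmem

theorem mem_dd (t : List (List Int)) (x : List Int) : x ∈ dd t ↔ x ∈ t := by
  cases t with
  | nil => simp [dd]
  | cons h tl =>
    simp only [dd]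
    constructor
    · intro hx
      rcases List.mem_cons.mp hx with rfl | hx
      · exact List.mem_cons_self
      · exact List.mem_cons_of_mem _ ((ddGo_sublist h tl).subset hx)
    · intro hx
      rcases List.mem_cons.mp hx with rfl | hx
      · exact List.mem_cons_self
      · rcases mem_ddGo_of_mem h x tl hx with rfl | hmem
        · exact List.mem_cons_self
        · exact List.mem_cons_of_mem _ hmem

theorem dd_sublist (t : List (List Int)) : (dd t).Sublist t := by
  cases t with
  | nil => simp [dd]
  | cons h tl => exact List.Sublist.cons₂ h (ddGo_sublist h tl)

theorem comp_aux (t : List (List Int)) : ∀ (n k : Nat) (acc : List (List Int)),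
    t.length - k = n → 1 ≤ k → k ≤ t.length →
    (PySem.List.pyRange (k : Int) t.length 1).foldl
      (fun acc j =>
        if j = 0 ∨ PySem.List.pyGetD t j [] ≠ PySem.List.pyGetD t (j - 1) [] then
          acc ++ [PySem.List.pyGetD t j []]
        else acc) acc
    = acc ++ ddGo (t.getD (k - 1) []) (t.drop k) := by
  intro n
  induction n with
  | zero =>
    intro k acc hn h1 h2
    have hk : k = t.length := by omega
    subst hk
    simp [PySem.List.pyRange_one_eq_nil (le_refl _), List.drop_length, ddGo]
  | succ n ihn =>
    intro k acc hn h1 h2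
    have hk : k < t.length := by omega
    have hgk : PySem.List.pyGetD t (k : Int) [] = t.getD k [] := by
      simp
    have hc1 : ((k : Int) - 1) = ((k - 1 : Nat) : Int) := by omega
    have hgk1 : PySem.List.pyGetD t ((k : Int) - 1) [] = t.getD (k - 1) [] := by
      rw [hc1]; simp [PySem.List.pyGetD_natCast]
    have hk0 : ¬ ((k : Int) = 0) := by omega
    have hdrop : t.drop k = t.getD k [] :: t.drop (k + 1) := by
      rw [List.getD_eq_getElem t [] hk]
      exact List.drop_eq_getElem_cons hk
    have hcast : ((k : Int) + 1) = ((k + 1 : Nat) : Int) := by push_cast; ring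
    rw [PySem.List.pyRange_one_cons (by exact_mod_cast hk), List.foldl_cons, hcast]
    by_cases heq : t.getD k [] = t.getD (k - 1) []
    · rw [if_neg (by push Not; refine ⟨hk0, ?_⟩; rw [hgk, hgk1]; simpa using heq)]
      rw [ihn (k + 1) acc (by omega) (by omega) (by omega)]
      simp only [Nat.add_sub_cancel]
      rw [hdrop]
      simp only [ddGo]
      rw [if_neg (by simpa using heq)]
    · rw [if_pos (Or.inr (by rw [hgk, hgk1]; exact heq))]
      rw [hgk]
      rw [ihn (k + 1) (acc ++ [t.getD k []]) (by omega) (by omega) (by omega)]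
      simp only [Nat.add_sub_cancel]
      rw [hdrop]
      simp only [ddGo]
      rw [if_pos (by simpa using heq)]
      simp

theorem comp_eq_dd (t : List (List Int)) :
    (PySem.List.pyRange 0 t.length 1).foldl
      (fun acc j =>
        if j = 0 ∨ PySem.List.pyGetD t j [] ≠ PySem.List.pyGetD t (j - 1) [] then
          acc ++ [PySem.List.pyGetD t j []]
        else acc) [] = dd t := by
  cases t with
  | nil => simp [dd, PySem.List.pyRange_one_eq_nil (le_refl _)]
  | cons x xs =>
    have hlen : 0 < (x :: xs).length := by simp
    rw [PySem.List.pyRange_one_cons (by exact_mod_cast hlen)]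
    rw [List.foldl_cons]
    rw [if_pos (Or.inl rfl)]
    have h0 : PySem.List.pyGetD (x :: xs) (0 : Int) [] = x := by
      simp
    rw [h0]
    have := comp_aux (x :: xs) ((x :: xs).length - 1) 1 ([] ++ [x]) rfl (by omega) (by omega)
    rw [show ((0 : Int) + 1) = ((1 : Nat) : Int) by norm_num]
    rw [this]
    simp [dd]

-- ---- the while-loop: consecutive extent upward ----
def extF (lis : List Int) : Nat → Int → Nat
  | 0, _ => 0
  | f + 1, x => if (x + 1) ∈ lis then extF lis f (x + 1) + 1 else 0

def ext (lis : List Int) (x : Int) : Nat := extF lis (lis.length + 1) x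

theorem extF_mem (lis : List Int) : ∀ (f : Nat) (x s : Int), 1 ≤ s → s ≤ extF lis f x →
    (x + s) ∈ lis := by
  intro f
  induction f with
  | zero => intro x s h1 h2; simp [extF] at h2; omega
  | succ f ih =>
    intro x s h1 h2
    simp only [extF] at h2
    by_cases hmem : (x + 1) ∈ lis
    · rw [if_pos hmem] at h2
      by_cases hs : s = 1
      · subst hs; exact hmem
      · have := ih (x + 1) (s - 1) (by omega) (by omega)
        have he : x + 1 + (s - 1) = x + s := by ring
        rwa [he] at this
    · rw [if_neg hmem] at h2; omega

theorem extF_top (lis : List Int) : ∀ (f : Nat) (x : Int), extF lis f x < f →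
    (x + extF lis f x + 1) ∉ lis := by
  intro f
  induction f with
  | zero => intro x h; omega
  | succ f ih =>
    intro x h
    by_cases hmem : (x + 1) ∈ lis
    · have he : extF lis (f + 1) x = extF lis f (x + 1) + 1 := by simp [extF, hmem]
      rw [he] at h ⊢
      have := ih (x + 1) (by omega)
      have harith : x + 1 + (extF lis f (x + 1) : Int) + 1 = x + ((extF lis f (x + 1) : Int) + 1) + 1 := by
        ring
      rw [harith] at this
      exact_mod_cast this
    · have he : extF lis (f + 1) x = 0 := by simp [extF, hmem]
      rw [he]; simpa using hmem

theorem ext_mem (lis : List Int) (x s : Int) (h1 : 1 ≤ s) (h2 : s ≤ ext lis x) : (x + s) ∈ lis :=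
  extF_mem lis _ x s h1 h2

theorem ext_le_len (lis : List Int) (x : Int) : ext lis x ≤ lis.length := by
  have hn := PySem.List.nodup_pyRange_one (x + 1) (x + 1 + (ext lis x : Int))
  have hsub : (PySem.List.pyRange (x + 1) (x + 1 + (ext lis x : Int)) 1) ⊆ lis := by
    intro y hy
    rw [PySem.List.mem_pyRange_one] at hy
    have h := ext_mem lis x (y - x) (by omega) (by omega)
    have he : x + (y - x) = y := by ring
    rwa [he] at h
  have hlen := (hn.subperm hsub).length_le
  rw [PySem.List.length_pyRange_one] at hlen
  omega

theorem ext_top (lis : List Int) (x : Int) : (x + ext lis x + 1) ∉ lis := by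
  exact extF_top lis _ x (by have := ext_le_len lis x; simp only [ext] at *; omega)

theorem ext_unique (lis : List Int) (x e : Int) (h0 : 0 ≤ e)
    (hmem : ∀ s : Int, 1 ≤ s → s ≤ e → (x + s) ∈ lis) (htop : (x + e + 1) ∉ lis) :
    e = (ext lis x : Int) := by
  by_contra hne
  rcases lt_or_gt_of_ne hne with hlt | hgt
  · have hm := ext_mem lis x (e + 1) (by omega) (by omega)
    have he : x + (e + 1) = x + e + 1 := by ring
    rw [he] at hm
    exact htop hm
  · have hm := hmem ((ext lis x : Int) + 1) (by omega) (by omega)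
    have he : x + ((ext lis x : Int) + 1) = x + (ext lis x : Int) + 1 := by ring
    rw [he] at hm
    exact ext_top lis x hm

-- the run grown from i, in closed form
def Rrun (lis : List Int) (i : Int) : List Int := PySem.List.pyRange i (i + 1 + ext lis i) 1

theorem length_Rrun (lis : List Int) (i : Int) : (Rrun lis i).length = 1 + ext lis i := by
  simp only [Rrun, PySem.List.length_pyRange_one]
  omega

theorem sorWhile_spec (lis : List Int) : ∀ (f : Nat) (i size : Int) (run : List Int),
    sorWhile lis f i run size =
      run ++ PySem.List.pyRange (i + size) (i + size + extF lis f (i + size - 1)) 1 := by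
  intro f
  induction f with
  | zero =>
    intro i size run
    simp [sorWhile, extF, PySem.List.pyRange_one_eq_nil (le_refl _)]
  | succ f ih =>
    intro i size run
    have hx : i + size - 1 + 1 = i + size := by ring
    by_cases hmem : (i + size) ∈ lis
    · have he : extF lis (f + 1) (i + size - 1) = extF lis f (i + size) + 1 := by
        simp [extF, hx, hmem]
      rw [show sorWhile lis (f + 1) i run size
            = sorWhile lis f i (run ++ [i + size]) (size + 1) by simp [sorWhile, hmem]]
      rw [ih i (size + 1) (run ++ [i + size])]
      have h2 : i + (size + 1) - 1 = i + size := by ring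
      rw [h2, he]
      push_cast
      rw [PySem.List.pyRange_one_cons (show i + size < i + size + ((extF lis f (i + size) : Int) + 1) by omega)]
      have h4 : i + size + ((extF lis f (i + size) : Int) + 1) = i + (size + 1) + (extF lis f (i + size) : Int) := by ring
      have h3 : i + size + 1 = i + (size + 1) := by ring
      rw [h4, h3]
      simp
    · have he : extF lis (f + 1) (i + size - 1) = 0 := by simp [extF, hx, hmem]
      rw [show sorWhile lis (f + 1) i run size = run by simp [sorWhile, hmem]]
      rw [he]
      simp [PySem.List.pyRange_one_eq_nil (le_refl _)]

theorem runFrom_eq (lis : List Int) (i : Int) :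
    sorWhile lis (lis.length + 1) i [i] 1 = Rrun lis i := by
  rw [sorWhile_spec]
  have h1 : i + 1 - 1 = i := by ring
  rw [h1]
  rw [Rrun, PySem.List.pyRange_one_cons (show i < i + 1 + (ext lis i : Int) by
    have : (0 : Int) ≤ (ext lis i : Int) := by positivity
    omega)]
  simp only [ext]
  have h2 : i + 1 + (extF lis (lis.length + 1) i : Int) = i + (1 + (extF lis (lis.length + 1) i : Int)) := by ring
  simp

-- ---- downward extent, block starts ----
def dextF (lis : List Int) : Nat → Int → Nat
  | 0, _ => 0
  | f + 1, x => if (x - 1) ∈ lis then dextF lis f (x - 1) + 1 else 0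

def dext (lis : List Int) (x : Int) : Nat := dextF lis (lis.length + 1) x

theorem dextF_mem (lis : List Int) : ∀ (f : Nat) (x s : Int), 1 ≤ s → s ≤ dextF lis f x →
    (x - s) ∈ lis := by
  intro f
  induction f with
  | zero => intro x s h1 h2; simp [dextF] at h2; omega
  | succ f ih =>
    intro x s h1 h2
    simp only [dextF] at h2
    by_cases hmem : (x - 1) ∈ lis
    · rw [if_pos hmem] at h2
      by_cases hs : s = 1
      · subst hs; exact hmem
      · have := ih (x - 1) (s - 1) (by omega) (by omega)
        have he : x - 1 - (s - 1) = x - s := by ring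
        rwa [he] at this
    · rw [if_neg hmem] at h2; omega

theorem dextF_top (lis : List Int) : ∀ (f : Nat) (x : Int), dextF lis f x < f →
    (x - dextF lis f x - 1) ∉ lis := by
  intro f
  induction f with
  | zero => intro x h; omega
  | succ f ih =>
    intro x h
    by_cases hmem : (x - 1) ∈ lis
    · have he : dextF lis (f + 1) x = dextF lis f (x - 1) + 1 := by simp [dextF, hmem]
      rw [he] at h ⊢
      have := ih (x - 1) (by omega)
      have harith : x - 1 - (dextF lis f (x - 1) : Int) - 1 = x - ((dextF lis f (x - 1) : Int) + 1) - 1 := by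
        ring
      rw [harith] at this
      exact_mod_cast this
    · have he : dextF lis (f + 1) x = 0 := by simp [dextF, hmem]
      rw [he]; simpa using hmem

theorem dext_mem (lis : List Int) (x s : Int) (h1 : 1 ≤ s) (h2 : s ≤ dext lis x) : (x - s) ∈ lis :=
  dextF_mem lis _ x s h1 h2

theorem dext_le_len (lis : List Int) (x : Int) : dext lis x ≤ lis.length := by
  have hn := PySem.List.nodup_pyRange_one (x - (dext lis x : Int)) x
  have hsub : (PySem.List.pyRange (x - (dext lis x : Int)) x 1) ⊆ lis := by
    intro y hy
    rw [PySem.List.mem_pyRange_one] at hy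
    have h := dext_mem lis x (x - y) (by omega) (by omega)
    have he : x - (x - y) = y := by ring
    rwa [he] at h
  have hlen := (hn.subperm hsub).length_le
  rw [PySem.List.length_pyRange_one] at hlen
  omega

theorem dext_top (lis : List Int) (x : Int) : (x - dext lis x - 1) ∉ lis := by
  exact dextF_top lis _ x (by have := dext_le_len lis x; simp only [dext] at *; omega)

theorem bsOf_mem (lis : List Int) (i : Int) (h : i ∈ lis) : (i - dext lis i) ∈ lis := by
  by_cases h0 : dext lis i = 0
  · simpa [h0] using h
  · exact dext_mem lis i (dext lis i) (by omega) (le_refl _)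

theorem ext_bsOf (lis : List Int) (i : Int) (h : i ∈ lis) :
    (ext lis (i - dext lis i) : Int) = ext lis i + dext lis i := by
  refine (ext_unique lis (i - dext lis i) ((ext lis i : Int) + dext lis i) (by positivity) ?_ ?_).symm
  · intro s h1 h2
    by_cases hsd : s ≤ (dext lis i : Int)
    · by_cases hse : s = (dext lis i : Int)
      · have he : i - (dext lis i : Int) + s = i := by rw [hse]; ring
        rwa [he]
      · have hm := dext_mem lis i ((dext lis i : Int) - s) (by omega) (by omega)
        have he : i - (dext lis i : Int) + s = i - ((dext lis i : Int) - s) := by ring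
        rwa [he]
    · have hm := ext_mem lis i (s - dext lis i) (by omega) (by omega)
      have he : i - (dext lis i : Int) + s = i + (s - (dext lis i : Int)) := by ring
      rwa [he]
  · have he : i - (dext lis i : Int) + ((ext lis i : Int) + (dext lis i : Int)) + 1
        = i + (ext lis i : Int) + 1 := by ring
    rw [he]
    exact ext_top lis i

-- ---- lexicographic facts on the Mathlib linear order of List Int ----
theorem replicate_le_replicate (n : Nat) (a b : Int) (h : a ≤ b) :
    List.replicate n a ≤ List.replicate n b := by
  induction n with
  | zero => simp
  | succ n ih =>
    simp only [List.replicate_succ]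
    rcases lt_or_eq_of_le h with hlt | rfl
    · exact le_of_lt (by rw [List.cons_lt_cons_iff]; exact Or.inl hlt)
    · exact List.cons_le_cons a ih

theorem Rrun_le_Rrun (lis : List Int) (bs i : Int) (hle : bs ≤ i)
    (hlen : ext lis bs = ext lis i) : Rrun lis bs ≤ Rrun lis i := by
  rcases lt_or_eq_of_le hle with hlt | rfl
  · have hb1 : bs < bs + 1 + (ext lis bs : Int) := by omega
    have hb2 : i < i + 1 + (ext lis i : Int) := by omega
    rw [Rrun, Rrun, PySem.List.pyRange_one_cons hb1, PySem.List.pyRange_one_cons hb2]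
    exact le_of_lt (by rw [List.cons_lt_cons_iff]; exact Or.inl hlt)
  · exact le_refl _

-- ---- sorted bridge: A's ports elaborate sorted with the core List.instLT instance ----
theorem sortedLL_pairwise (t : List (List Int)) :
    (PySem.List.sorted t (fun x => x) false).Pairwise (· ≤ ·) := by
  have he : (PySem.List.sorted t (fun x => x) false)
      = @PySem.List.sorted (List ℤ) (List ℤ) LinearOrder.toPartialOrder.toLT
          LinearOrder.toDecidableLT t (fun x => x) false := by
    congr 1
  rw [he]
  exact PySem.List.sorted_pairwise t _

-- ---- B's scan invariant ----
def step2 (s : Int × Int × Int × Int) (x : Int) : Int × Int × Int × Int :=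
  let (bs, bl, cs, cl) := s
  let cs' := if x = cs + cl then cs else x
  let cl' := if x = cs + cl then cl + 1 else 1
  if bl < cl' then (cs', cl', cs', cl') else (bs, bl, cs', cl')

def ScanInv (lis : List Int) (last bs bl cs cl : Int) : Prop :=
  cs ∈ lis ∧ (cs - 1) ∉ lis ∧ cl = last - cs + 1 ∧ (∀ y, cs ≤ y → y ≤ last → y ∈ lis) ∧
  bs ∈ lis ∧ (bs - 1) ∉ lis ∧ bs ≤ cs ∧ 1 ≤ cl ∧ cl ≤ bl ∧
  ((bs = cs ∧ bl = cl) ∨ (bs + (ext lis bs : Int) < cs ∧ bl = 1 + ext lis bs)) ∧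
  (∀ b, b ∈ lis → (b - 1) ∉ lis → b ≤ last → b ≠ cs →
    (1 + (ext lis b : Int) ≤ bl ∧ (1 + (ext lis b : Int) = bl → bs ≤ b)))

theorem scan_step (lis : List Int) (x last bs bl cs cl : Int)
    (hinv : ScanInv lis last bs bl cs cl) (hx : x ∈ lis) (hlt : last < x)
    (hgap : ∀ y, y ∈ lis → last < y → y < x → False) :
    ScanInv lis x (step2 (bs, bl, cs, cl) x).1 (step2 (bs, bl, cs, cl) x).2.1
      (step2 (bs, bl, cs, cl) x).2.2.1 (step2 (bs, bl, cs, cl) x).2.2.2 := by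
  obtain ⟨hcs, hcs1, hcl, hint, hbs, hbs1, hbscs, hcl1, hclbl, hdisj, hiii⟩ := hinv
  have hlastmem : last ∈ lis := hint last (by omega) (le_refl _)
  by_cases hc : x = cs + cl
  · -- continuation of the current block: x = last + 1
    have hxl : x = last + 1 := by omega
    have hblast : ∀ b : Int, b ∈ lis → (b - 1) ∉ lis → b ≤ x → b ≤ last := by
      intro b hbmem hbpred hble
      rcases (by omega : b ≤ last ∨ b = x) with h | rfl
      · exact h
      · exact absurd (by rw [hxl]; simpa using hlastmem) hbpred
    by_cases hb : bl < cl + 1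
    · simp only [step2, if_pos hc, if_pos hb]
      refine ⟨hcs, hcs1, by omega, ?_, hcs, hcs1, le_refl _, by omega, by omega,
        Or.inl ⟨rfl, rfl⟩, ?_⟩
      · intro y hy1 hy2
        rcases (by omega : y ≤ last ∨ y = x) with h | rfl
        · exact hint y hy1 h
        · exact hx
      · intro b hbmem hbpred hble hbne
        have := hiii b hbmem hbpred (hblast b hbmem hbpred hble) hbne
        exact ⟨by omega, by omega⟩
    · simp only [step2, if_pos hc, if_neg hb]
      rcases hdisj with ⟨heq1, heq2⟩ | ⟨hlt2, hbl2⟩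
      · omega
      · refine ⟨hcs, hcs1, by omega, ?_, hbs, hbs1, hbscs, by omega, by omega,
          Or.inr ⟨hlt2, hbl2⟩, ?_⟩
        · intro y hy1 hy2
          rcases (by omega : y ≤ last ∨ y = x) with h | rfl
          · exact hint y hy1 h
          · exact hx
        · intro b hbmem hbpred hble hbne
          exact hiii b hbmem hbpred (hblast b hbmem hbpred hble) hbne
  · -- a gap: x starts a new block
    have hxgap : last + 1 < x := by omega
    have hx1 : (x - 1) ∉ lis := fun hmem => hgap (x - 1) hmem (by omega) (by omega)
    have hlast1 : (last + 1) ∉ lis := fun hmem => hgap (last + 1) hmem (by omega) (by omega)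
    have hextcs : (ext lis cs : Int) = last - cs := by
      refine (ext_unique lis cs (last - cs) (by omega) ?_ ?_).symm
      · intro s hs1 hs2; exact hint (cs + s) (by omega) (by omega)
      · have he : cs + (last - cs) + 1 = last + 1 := by ring
        rw [he]; exact hlast1
    have hblbest : bl = 1 + (ext lis bs : Int) ∧ bs + (ext lis bs : Int) < x := by
      rcases hdisj with ⟨heq1, heq2⟩ | ⟨hlt2, hbl2⟩
      · subst heq1
        exact ⟨by rw [hextcs]; omega, by rw [hextcs]; omega⟩
      · exact ⟨hbl2, by omega⟩
    have hbnotlt : ¬ bl < 1 := by omega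
    simp only [step2, if_neg hc, if_neg hbnotlt]
    refine ⟨hx, hx1, by omega, ?_, hbs, hbs1, by omega, by omega, by omega,
      Or.inr ⟨hblbest.2, hblbest.1⟩, ?_⟩
    · intro y hy1 hy2
      have : y = x := by omega
      subst this; exact hx
    · intro b hbmem hbpred hble hbne
      have hblast : b ≤ last := by
        by_contra hgt'
        rcases (by omega : b = x ∨ (last < b ∧ b < x)) with rfl | ⟨h1, h2⟩
        · exact hbne rfl
        · exact hgap b hbmem h1 h2
      by_cases hbc : b = cs
      · subst hbc
        refine ⟨by rw [hextcs]; omega, fun _ => hbscs⟩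
      · exact hiii b hbmem hbpred hblast hbc

theorem scan_fold (lis : List Int) : ∀ (t : List Int) (last bs bl cs cl : Int),
    ScanInv lis last bs bl cs cl → (∀ y ∈ t, last < y) → t.Pairwise (· < ·) →
    (∀ y ∈ t, y ∈ lis) → (∀ y, y ∈ lis → last < y → y ∈ t) →
    ∃ last', (∀ y ∈ lis, y ≤ last') ∧
      ScanInv lis last' (t.foldl step2 (bs, bl, cs, cl)).1 (t.foldl step2 (bs, bl, cs, cl)).2.1
        (t.foldl step2 (bs, bl, cs, cl)).2.2.1 (t.foldl step2 (bs, bl, cs, cl)).2.2.2 := by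
  intro t
  induction t with
  | nil =>
    intro last bs bl cs cl hinv hgt hpw hmem hcov
    refine ⟨last, fun y hy => ?_, hinv⟩
    by_contra hgt'
    exact absurd (hcov y hy (by omega)) (List.not_mem_nil)
  | cons x t ih =>
    intro last bs bl cs cl hinv hgt hpw hmem hcov
    rw [List.pairwise_cons] at hpw
    obtain ⟨hxall, hpw'⟩ := hpw
    have hstep := scan_step lis x last bs bl cs cl hinv (hmem x List.mem_cons_self)
      (hgt x List.mem_cons_self)
      (fun y hy hy1 hy2 => by
        rcases List.mem_cons.mp (hcov y hy hy1) with rfl | hyt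
        · omega
        · exact absurd hy2 (not_lt.mpr (le_of_lt (hxall y hyt))))
    rcases hst : step2 (bs, bl, cs, cl) x with ⟨bs', bl', cs', cl'⟩
    rw [hst] at hstep
    rw [List.foldl_cons, hst]
    exact ih x bs' bl' cs' cl' hstep
      (fun y hy => hxall y hy)
      hpw'
      (fun y hy => hmem y (List.mem_cons_of_mem _ hy))
      (fun y hy hgty => by
        rcases List.mem_cons.mp (hcov y hy (lt_trans (hgt x List.mem_cons_self) hgty)) with rfl | hyt
        · omega
        · exact hyt)

-- final facts extracted from the scan: bs/bl is the best block
theorem scan_final (lis : List Int) (last bs bl cs cl : Int)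
    (hinv : ScanInv lis last bs bl cs cl) (hmax : ∀ y ∈ lis, y ≤ last) :
    bs ∈ lis ∧ bl = 1 + (ext lis bs : Int) ∧
      (∀ i ∈ lis, 1 + (ext lis i : Int) ≤ bl) ∧
      (∀ i ∈ lis, 1 + (ext lis i : Int) = bl → bs ≤ i) := by
  obtain ⟨hcs, hcs1, hcl, hint, hbs, hbs1, hbscs, hcl1, hclbl, hdisj, hiii⟩ := hinv
  have hlast1 : (last + 1) ∉ lis := fun h => by have := hmax _ h; omega
  have hextcs : (ext lis cs : Int) = last - cs := by
    refine (ext_unique lis cs (last - cs) (by omega) ?_ ?_).symm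
    · intro s hs1 hs2; exact hint (cs + s) (by omega) (by omega)
    · have he : cs + (last - cs) + 1 = last + 1 := by ring
      rw [he]; exact hlast1
  have hblv : bl = 1 + (ext lis bs : Int) := by
    rcases hdisj with ⟨heq1, heq2⟩ | ⟨_, hbl2⟩
    · subst heq1; rw [hextcs]; omega
    · exact hbl2
  have key : ∀ i ∈ lis, (1 + (ext lis i : Int) ≤ bl ∧ (1 + (ext lis i : Int) = bl → bs ≤ i)) := by
    intro i hi
    have hbmem := bsOf_mem lis i hi
    have hbpred : (i - (dext lis i : Int) - 1) ∉ lis := dext_top lis i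
    have hbext : (ext lis (i - (dext lis i : Int)) : Int) = ext lis i + dext lis i :=
      ext_bsOf lis i hi
    have hble : i - (dext lis i : Int) ≤ last := le_trans (by omega) (hmax i hi)
    by_cases hbc : i - (dext lis i : Int) = cs
    · have h1 : 1 + (ext lis (i - (dext lis i : Int)) : Int) = cl := by rw [hbc, hextcs]; omega
      exact ⟨by omega, fun _ => by omega⟩
    · have h2 := hiii _ hbmem hbpred hble hbc
      exact ⟨by omega, fun htie => by
        have h3 := h2.2 (by omega)
        omega⟩
  exact ⟨hbs, hblv, fun i hi => (key i hi).1, fun i hi => (key i hi).2⟩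

-- ---- characterizations of A's two candidate lists ----
theorem sorRuns_eq (lis : List Int) :
    sorRuns lis = dd (PySem.List.sorted (lis.map (Rrun lis)) (fun x => x) false) := by
  simp only [sorRuns]
  rw [foldl_append_map]
  simp only [runFrom_eq, List.nil_append]
  exact comp_eq_dd _

theorem mem_sorRuns (lis : List Int) (x : List Int) :
    x ∈ sorRuns lis ↔ ∃ i ∈ lis, x = Rrun lis i := by
  rw [sorRuns_eq, mem_dd, PySem.List.mem_sorted]
  simp only [List.mem_map]
  constructor
  · rintro ⟨i, hi, rfl⟩; exact ⟨i, hi, rfl⟩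
  · rintro ⟨i, hi, rfl⟩; exact ⟨i, hi, rfl⟩

theorem pairwise_sorRuns (lis : List Int) : (sorRuns lis).Pairwise (· ≤ ·) := by
  rw [sorRuns_eq]
  exact (sortedLL_pairwise _).sublist (dd_sublist _)

theorem sorStraights_eq (lis : List Int) :
    sorStraights lis = PySem.List.sorted
      ((PySem.Set.ofList lis).map (fun i => List.replicate (lis.count i) i)) (fun x => x) false := by
  simp only [sorStraights]
  rw [foldl_append_map]
  simp only [PySem.Dict.getD_counter, Int.toNat_natCast, List.nil_append]

theorem mem_sorStraights (lis : List Int) (x : List Int) :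
    x ∈ sorStraights lis ↔ ∃ i ∈ lis, x = List.replicate (lis.count i) i := by
  rw [sorStraights_eq, PySem.List.mem_sorted]
  simp only [List.mem_map, PySem.Set.mem_ofList]
  constructor
  · rintro ⟨i, hi, rfl⟩; exact ⟨i, hi, rfl⟩
  · rintro ⟨i, hi, rfl⟩; exact ⟨i, hi, rfl⟩

theorem pairwise_sorStraights (lis : List Int) : (sorStraights lis).Pairwise (· ≤ ·) := by
  rw [sorStraights_eq]
  exact sortedLL_pairwise _

-- ---- the main equivalence on nonempty input ----
theorem sor_eq_sor_alt (lis : List Int) (hne : lis ≠ []) : sor lis = sor_alt lis := by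
  have hofne : PySem.Set.ofList lis ≠ [] := by
    intro h
    cases lis with
    | nil => exact hne rfl
    | cons a l =>
      have ha : a ∈ PySem.Set.ofList (a :: l) := (PySem.Set.mem_ofList _ _).mpr List.mem_cons_self
      rw [h] at ha; exact absurd ha List.not_mem_nil
  have hvals_ne : PySem.List.sorted (PySem.Set.ofList lis) (fun x => x) false ≠ [] := by
    intro h; exact hofne ((PySem.List.sorted_eq_nil_iff _ _ _).mp h)
  obtain ⟨v0, rest, hvr⟩ : ∃ v0 rest,
      PySem.List.sorted (PySem.Set.ofList lis) (fun x => x) false = v0 :: rest := by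
    cases hv : PySem.List.sorted (PySem.Set.ofList lis) (fun x => x) false with
    | nil => exact absurd hv hvals_ne
    | cons a l => exact ⟨a, l, rfl⟩
  have hvals_mem : ∀ y : Int, y ∈ (v0 :: rest) ↔ y ∈ lis := by
    intro y; rw [← hvr, PySem.List.mem_sorted]; exact PySem.Set.mem_ofList _ _
  have hvals_pw : (v0 :: rest).Pairwise (· < ·) := by
    rw [← hvr]; exact PySem.List.sorted_ofList_pairwise_lt _
  have hv0_min : ∀ y ∈ lis, v0 ≤ y := by
    intro y hy
    exact PySem.List.key_head_sorted_le (PySem.Set.ofList lis) (fun x => x) hvr y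
      ((PySem.Set.mem_ofList _ _).mpr hy)
  have hv0_mem : v0 ∈ lis := (hvals_mem v0).mp List.mem_cons_self
  have hv0_pred : (v0 - 1) ∉ lis := fun h => by have := hv0_min _ h; omega
  have hinv0 : ScanInv lis v0 v0 1 v0 1 := by
    refine ⟨hv0_mem, hv0_pred, by omega, ?_, hv0_mem, hv0_pred, le_refl _, le_refl _, le_refl _,
      Or.inl ⟨rfl, rfl⟩, ?_⟩
    · intro y h1 h2
      have : y = v0 := by omega
      subst this; exact hv0_mem
    · intro b hb _ hble hbne
      exact absurd (le_antisymm hble (hv0_min b hb)) hbne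
  have hrest_pw : rest.Pairwise (· < ·) := (List.pairwise_cons.mp hvals_pw).2
  have hrest_gt : ∀ y ∈ rest, v0 < y := (List.pairwise_cons.mp hvals_pw).1
  obtain ⟨last, hmax, hinv⟩ := scan_fold lis rest v0 v0 1 v0 1 hinv0 hrest_gt hrest_pw
    (fun y hy => (hvals_mem y).mp (List.mem_cons_of_mem _ hy))
    (fun y hy hgt => by
      rcases List.mem_cons.mp ((hvals_mem y).mpr hy) with rfl | h
      · omega
      · exact h)
  rcases hst : rest.foldl step2 (v0, 1, v0, 1) with ⟨bs, bl, cs, cl⟩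
  rw [hst] at hinv
  dsimp only at hinv
  obtain ⟨hbs_mem, hbl, hR2, hR3⟩ := scan_final lis last bs bl cs cl hinv hmax
  -- Counter facts
  have hvalues : (PySem.Dict.counter lis).values
      = (PySem.Set.ofList lis).map (fun k => (lis.count k : Int)) := by
    show (PySem.Dict.counter lis).items.map (fun p => p.2) = _
    rw [PySem.Dict.items_counter]
    simp [List.map_map, Function.comp]
  have hvalues_ne : (PySem.Dict.counter lis).values ≠ [] := by
    rw [hvalues]
    intro h
    rw [List.map_eq_nil_iff] at h
    exact hofne h
  obtain ⟨c, hc_some⟩ : ∃ c, PySem.List.max? (PySem.Dict.counter lis).values (fun y => y) = some c := by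
    cases h : PySem.List.max? (PySem.Dict.counter lis).values (fun y => y) with
    | none => exact absurd ((PySem.List.max?_eq_none_iff _ _).mp h) hvalues_ne
    | some c => exact ⟨c, rfl⟩
  have hc_mem : ∃ k ∈ lis, c = (lis.count k : Int) := by
    have hm := PySem.List.max?_mem hc_some
    rw [hvalues] at hm
    obtain ⟨k, hk, he⟩ := List.mem_map.mp hm
    exact ⟨k, (PySem.Set.mem_ofList _ _).mp hk, he.symm⟩
  have hc_max : ∀ k ∈ lis, (lis.count k : Int) ≤ c := by
    intro k hk
    exact PySem.List.max?_isMax hc_some _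
      (by rw [hvalues]; exact List.mem_map.mpr ⟨k, (PySem.Set.mem_ofList _ _).mpr hk, rfl⟩)
  have hfl_mem : ∀ w : Int,
      w ∈ (((PySem.Dict.counter lis).items.filter (fun p => p.2 == c)).map (fun p => p.1))
        ↔ (w ∈ lis ∧ (lis.count w : Int) = c) := by
    intro w
    rw [PySem.Dict.items_counter]
    simp only [List.mem_map, List.mem_filter, PySem.Set.mem_ofList, beq_iff_eq]
    constructor
    · rintro ⟨p, ⟨⟨k, hk, rfl⟩, hpc⟩, rfl⟩
      exact ⟨hk, hpc⟩
    · rintro ⟨hw, hwc⟩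
      exact ⟨(w, (lis.count w : Int)), ⟨⟨w, hw, rfl⟩, hwc⟩, rfl⟩
  obtain ⟨k0, hk0, hk0c⟩ := hc_mem
  have hfl_ne : (((PySem.Dict.counter lis).items.filter (fun p => p.2 == c)).map (fun p => p.1)) ≠ [] := by
    intro h
    have hm : k0 ∈ (((PySem.Dict.counter lis).items.filter (fun p => p.2 == c)).map (fun p => p.1)) :=
      (hfl_mem k0).mpr ⟨hk0, hk0c.symm⟩
    rw [h] at hm; exact absurd hm List.not_mem_nil
  obtain ⟨v, hv_some⟩ : ∃ v, PySem.List.min?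
      (((PySem.Dict.counter lis).items.filter (fun p => p.2 == c)).map (fun p => p.1))
      (fun y => y) = some v := by
    cases h : PySem.List.min?
        (((PySem.Dict.counter lis).items.filter (fun p => p.2 == c)).map (fun p => p.1))
        (fun y => y) with
    | none => exact absurd ((PySem.List.min?_eq_none_iff _ _).mp h) hfl_ne
    | some v => exact ⟨v, rfl⟩
  have hv_mem : v ∈ lis ∧ (lis.count v : Int) = c := (hfl_mem v).mp (PySem.List.min?_mem hv_some)
  have hv_min : ∀ w ∈ lis, (lis.count w : Int) = c → v ≤ w := fun w hw hwc =>
    PySem.List.min?_isMin hv_some w ((hfl_mem w).mpr ⟨hw, hwc⟩)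
  have hc_pos : 0 < c := by
    have h1 : 0 < lis.count v := List.count_pos_iff.mpr hv_mem.1
    omega
  -- stage 1: the runs loop picks B's best block
  have hisQ_B : isQ (sorRuns lis) [] (Rrun lis bs) := by
    right
    refine ⟨(mem_sorRuns lis _).mpr ⟨bs, hbs_mem, rfl⟩, ?_, ?_, ?_⟩
    · rw [length_Rrun, List.length_nil]; omega
    · intro x hx
      obtain ⟨i, hi, rfl⟩ := (mem_sorRuns lis x).mp hx
      have := hR2 i hi
      rw [length_Rrun, length_Rrun]
      omega
    · intro x hx hlen
      obtain ⟨i, hi, rfl⟩ := (mem_sorRuns lis x).mp hx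
      rw [length_Rrun, length_Rrun] at hlen
      have hle : bs ≤ i := hR3 i hi (by omega)
      exact Rrun_le_Rrun lis bs i hle (by omega)
  have hstage1 : (sorRuns lis).foldl pstep [] = Rrun lis bs :=
    isQ_unique _ _ _ _ _ (pick_isQ _ _ (pairwise_sorRuns lis)) hisQ_B (fun _ => Iff.rfl)
  -- A's value as two picks
  have hA : sor lis = (sorStraights lis).foldl pstep ((sorRuns lis).foldl pstep []) := rfl
  -- B's value
  have hB : sor_alt lis = (if bl < c then List.replicate c.toNat v
      else (PySem.List.pyRange 0 bl 1).map (fun i => bs + i)) := by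
    rw [sor_alt, if_neg hne]
    dsimp only
    rw [PySem.Dict.keys_counter, hvr, hc_some]
    dsimp only [Option.getD_some]
    rw [hv_some]
    dsimp only [Option.getD_some]
    rw [show rest.foldl
        (fun (s : Int × Int × Int × Int) x =>
          let (bs, bl, cs, cl) := s
          let cs' := if x = cs + cl then cs else x
          let cl' := if x = cs + cl then cl + 1 else 1
          if bl < cl' then (cs', cl', cs', cl') else (bs, bl, cs', cl'))
        (v0, 1, v0, 1) = ((bs, bl, cs, cl) : Int × Int × Int × Int) from hst]
    rfl
  by_cases hcb : bl < c
  · -- the biggest duplicate group wins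
    have hcv : c.toNat = lis.count v := by omega
    have hisQ2_B : isQ (sorStraights lis) (Rrun lis bs) (List.replicate c.toNat v) := by
      right
      refine ⟨(mem_sorStraights lis _).mpr ⟨v, hv_mem.1, by rw [hcv]⟩, ?_, ?_, ?_⟩
      · rw [length_Rrun, List.length_replicate]; omega
      · intro x hx
        obtain ⟨i, hi, rfl⟩ := (mem_sorStraights lis x).mp hx
        have := hc_max i hi
        rw [List.length_replicate, List.length_replicate]
        omega
      · intro x hx hlen
        obtain ⟨i, hi, rfl⟩ := (mem_sorStraights lis x).mp hx
        rw [List.length_replicate, List.length_replicate] at hlen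
        have hwc : (lis.count i : Int) = c := by omega
        have hvi : v ≤ i := hv_min i hi hwc
        rw [show lis.count i = c.toNat by omega]
        exact replicate_le_replicate c.toNat v i hvi
    have hstage2 : (sorStraights lis).foldl pstep (Rrun lis bs) = List.replicate c.toNat v :=
      isQ_unique _ _ _ _ _ (pick_isQ _ _ (pairwise_sorStraights lis)) hisQ2_B (fun _ => Iff.rfl)
    rw [hA, hstage1, hstage2, hB, if_pos hcb]
  · -- the best run wins
    have hisQ2_B : isQ (sorStraights lis) (Rrun lis bs) (Rrun lis bs) := by
      left
      refine ⟨rfl, ?_⟩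
      intro x hx
      obtain ⟨i, hi, rfl⟩ := (mem_sorStraights lis x).mp hx
      have := hc_max i hi
      rw [List.length_replicate, length_Rrun]
      omega
    have hstage2 : (sorStraights lis).foldl pstep (Rrun lis bs) = Rrun lis bs :=
      isQ_unique _ _ _ _ _ (pick_isQ _ _ (pairwise_sorStraights lis)) hisQ2_B (fun _ => Iff.rfl)
    have hBrun : (PySem.List.pyRange 0 bl 1).map (fun i => bs + i) = Rrun lis bs := by
      rw [Rrun, PySem.List.pyRange_one, PySem.List.pyRange_one]
      rw [show (bs + 1 + (ext lis bs : Int) - bs).toNat = (bl - 0).toNat by omega]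
      rw [List.map_map]
      apply List.map_congr_left
      intro k _
      simp [Function.comp]
    rw [hA, hstage1, hstage2, hB, if_neg hcb, hBrun]

-- ===== VERDICT (by name: the statement is the Claim_ definition above) =====
theorem sor_spec : Claim_equal_sor := by
  unfold Claim_equal_sor
  intro lis _hdom
  unfold Spec_sor
  by_cases hne : lis = []
  · subst hne; rfl
  · exact sor_eq_sor_alt lis hne
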